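-- pv_equiv track=rewrite | github.com/daniel-reich/ubiquitous-fiesta | ke4FSMdG2XYxbGQny_5.py | even_odd_transform
-- ===== SOURCE A (Python) =====
-- def even_odd_transform(lst, n):
--   l=lst
--   if len(l)==0:
--     return l
--   for i in range(n):
--     for j in range(len(l)):
--       if l[j]%2==0:
--         l[j]=l[j]-2
--       else:
--         l[j]=l[j]+2
--   return l
-- ===== SOURCE B (Python) =====
-- def even_odd_transform(lst, n):
--     # Parity is invariant under +-2, so n rounds collapse to one shift of 2*n
--     # (zero rounds when n <= 0, since range(n) is empty).
--     # Note: A mutates lst in place; B returns a new list (return value is equal).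
--     shift = 2 * n if n > 0 else 0
--     return [x - shift if x % 2 == 0 else x + shift for x in lst]
-- ===== Notes on version B (the rewrite author's own statement) =====
-- stated objective: faster
-- what changed: Replaces the n-round nested loop by a single pass using parity invariance: each even element becomes x-2n and each odd becomes x+2n (no shift when n<=0); note A mutates lst in place while B builds a new list, the equivalence is about the return value.
import Mathlib
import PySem

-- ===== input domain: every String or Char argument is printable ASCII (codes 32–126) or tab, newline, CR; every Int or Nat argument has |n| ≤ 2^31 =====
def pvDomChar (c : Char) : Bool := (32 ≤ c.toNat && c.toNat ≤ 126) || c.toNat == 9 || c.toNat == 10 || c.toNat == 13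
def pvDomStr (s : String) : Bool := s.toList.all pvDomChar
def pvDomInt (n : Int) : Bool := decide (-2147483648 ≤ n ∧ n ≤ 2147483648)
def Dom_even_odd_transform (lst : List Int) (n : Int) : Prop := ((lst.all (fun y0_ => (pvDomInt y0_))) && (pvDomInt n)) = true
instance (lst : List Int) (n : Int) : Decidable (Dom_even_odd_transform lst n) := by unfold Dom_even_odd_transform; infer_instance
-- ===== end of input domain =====

-- B replaces A's n-round nested loop by a single pass using parity invariance
-- (even -> x-2n, odd -> x+2n, no shift for n <= 0); faster asymptotically.
-- A mutates lst in place; the equivalence proved here is about the RETURN value only.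


-- ===== PORT A =====
def even_odd_transform (lst : List Int) (n : Int) : List Int :=
  let l := lst
  if l.length == 0 then l
  else
    (PySem.List.pyRange 0 n 1).foldl (fun l _ =>
      (List.range l.length).foldl (fun l j =>
        if PySem.Int.mod (l.getD j 0) 2 == 0 then
          l.set j (l.getD j 0 - 2)
        else
          l.set j (l.getD j 0 + 2)) l) l

-- ===== PORT B =====
def even_odd_transform_alt (lst : List Int) (n : Int) : List Int :=
  let shift : Int := if n > 0 then 2 * n else 0
  lst.map (fun x => if PySem.Int.mod x 2 == 0 then x - shift else x + shift)

-- ===== PRECONDITION & SPEC =====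
def Spec_even_odd_transform (lst : List Int) (n : Int) (out : List Int) : Prop := out = even_odd_transform_alt lst n
instance (lst : List Int) (n : Int) (out : List Int) : Decidable (Spec_even_odd_transform lst n out) := by unfold Spec_even_odd_transform; infer_instance

-- ===== CLAIM (what is proved, stated in full; the proofs are below) =====
def Claim_equal_even_odd_transform : Prop := ∀ (lst : List Int) (n : Int), Dom_even_odd_transform lst n → Spec_even_odd_transform lst n (even_odd_transform lst n)

-- ===== LEMMAS AND PROOFS =====

-- one round of A: even -> x-2, odd -> x+2
def pvStep (x : Int) : Int := if PySem.Int.mod x 2 == 0 then x - 2 else x + 2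

lemma pvInner (rest acc : List Int) :
    (List.range' acc.length rest.length).foldl (fun l j =>
        if PySem.Int.mod (l.getD j 0) 2 == 0 then
          l.set j (l.getD j 0 - 2)
        else
          l.set j (l.getD j 0 + 2)) (acc ++ rest)
      = acc ++ rest.map pvStep := by
  induction rest generalizing acc with
  | nil => simp
  | cons x rs ih =>
      have hget : (acc ++ x :: rs).getD acc.length 0 = x := by
        simp [List.getD]
      have hset : ∀ v, (acc ++ x :: rs).set acc.length v = acc ++ v :: rs := by
        intro v; rw [List.set_append_right _ _ (le_refl _)]; simp
      simp only [List.length_cons, List.range'_succ, List.foldl_cons, hget]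
      have hif : (if (PySem.Int.mod x 2 == 0) = true then
            (acc ++ x :: rs).set acc.length (x - 2)
          else (acc ++ x :: rs).set acc.length (x + 2)) = acc ++ pvStep x :: rs := by
        unfold pvStep; split <;> rw [hset]
      rw [hif]
      have := ih (acc ++ [pvStep x])
      simpa [List.append_assoc] using this

lemma pvInner0 (l : List Int) :
    (List.range l.length).foldl (fun l j =>
        if PySem.Int.mod (l.getD j 0) 0x2 == 0 then
          l.set j (l.getD j 0 - 2)
        else
          l.set j (l.getD j 0 + 2)) l = l.map pvStep := by
  have := pvInner l []
  simpa [List.range_eq_range'] using this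

lemma pvMod_parity (x c : Int) : PySem.Int.mod (x + 2 * c) 2 = PySem.Int.mod x 2 := by
  rw [PySem.Int.mod_eq_emod_of_pos (by norm_num), PySem.Int.mod_eq_emod_of_pos (by norm_num)]
  omega

lemma pvStep_parity (x : Int) :
    (PySem.Int.mod (pvStep x) 2 == 0) = (PySem.Int.mod x 2 == 0) := by
  unfold pvStep
  by_cases h : (PySem.Int.mod x 2 == 0) = true
  · simp only [h, if_true]
    have hx : x - 2 = x + 2 * (-1) := by ring
    rw [hx, pvMod_parity, h]
  · have h' : (PySem.Int.mod x 2 == 0) = false := by simpa using h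
    simp only [h', Bool.false_eq_true, if_false]
    have hx : x + 2 = x + 2 * 1 := by ring
    rw [hx, pvMod_parity, h']

lemma pvOuter (r : List Int) (l : List Int) :
    r.foldl (fun l _ => l.map pvStep) l
      = l.map (fun x => if PySem.Int.mod x 2 == 0 then x - 2 * r.length else x + 2 * r.length) := by
  induction r generalizing l with
  | nil => simp
  | cons a rs ih =>
      rw [List.foldl_cons, ih, List.map_map]
      apply List.map_congr_left
      intro x _
      simp only [Function.comp]
      rw [pvStep_parity x]
      by_cases h : (PySem.Int.mod x 2 == 0) = true <;>
        simp only [pvStep, h, if_true, if_false, Bool.false_eq_true, List.length_cons] <;>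
        push_cast <;> ring

-- ===== VERDICT (by name: the statement is the Claim_ definition above) =====
theorem even_odd_transform_spec : Claim_equal_even_odd_transform := by
  intro lst n _
  unfold Spec_even_odd_transform even_odd_transform even_odd_transform_alt
  by_cases hl : lst.length == 0
  · simp only [hl, if_pos]
    have : lst = [] := by simpa using hl
    simp [this]
  · simp only [hl, if_neg, Bool.false_eq_true, not_false_iff]
    have hcong : ∀ l : List Int,
        (PySem.List.pyRange 0 n 1).foldl (fun l _ =>
          (List.range l.length).foldl (fun l j =>
            if PySem.Int.mod (l.getD j 0) 2 == 0 then
              l.set j (l.getD j 0 - 2)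
            else
              l.set j (l.getD j 0 + 2)) l) l
        = (PySem.List.pyRange 0 n 1).foldl (fun l _ => l.map pvStep) l := by
      intro l
      congr 1
      funext acc j
      exact pvInner0 acc
    rw [hcong, pvOuter]
    have hlen : ((PySem.List.pyRange 0 n 1).length : Int) = if n > 0 then n else 0 := by
      rw [PySem.List.length_pyRange_one]
      by_cases h : n > 0
      · simp [h]; omega
      · simp [h]; omega
    apply List.map_congr_left
    intro x _
    rw [hlen]
    by_cases h : n > 0 <;> by_cases hm : PySem.Int.mod x 2 == 0 <;>
      simp only [h, hm, if_true, if_false, Bool.false_eq_true] <;> ring
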